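-- pv_equiv track=rewrite | github.com/JanusQ/QuCT-Micro2023 | utils/backend.py | get_linear_neighbor_info
-- ===== SOURCE A (Python) =====
-- def get_linear_neighbor_info(n_qubits, max_distance):
--     return {
--         q1: [
--             q2 for q2 in range(n_qubits)
--             if q1 != q2 and (q1-q2)**2 <= max_distance**2
--         ]
--         for q1 in range(n_qubits)
--     }
-- ===== SOURCE B (Python) =====
-- def get_linear_neighbor_info(n_qubits, max_distance):
--     ad = abs(max_distance)
--     res = {}
--     for q1 in range(n_qubits):
--         lo = max(0, q1 - ad)
--         hi = min(n_qubits, q1 + ad + 1)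
--         res[q1] = list(range(lo, q1)) + list(range(q1 + 1, hi))
--     return res
-- ===== Notes on version B (the rewrite author's own statement) =====
-- stated objective: faster
-- what changed: B computes each qubit's neighbor list directly as the window range [q1-|d|, q1+|d|] clipped to [0, n) (two range slices), instead of scanning all n qubits and testing the squared-distance predicate for each pair.
import Mathlib
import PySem

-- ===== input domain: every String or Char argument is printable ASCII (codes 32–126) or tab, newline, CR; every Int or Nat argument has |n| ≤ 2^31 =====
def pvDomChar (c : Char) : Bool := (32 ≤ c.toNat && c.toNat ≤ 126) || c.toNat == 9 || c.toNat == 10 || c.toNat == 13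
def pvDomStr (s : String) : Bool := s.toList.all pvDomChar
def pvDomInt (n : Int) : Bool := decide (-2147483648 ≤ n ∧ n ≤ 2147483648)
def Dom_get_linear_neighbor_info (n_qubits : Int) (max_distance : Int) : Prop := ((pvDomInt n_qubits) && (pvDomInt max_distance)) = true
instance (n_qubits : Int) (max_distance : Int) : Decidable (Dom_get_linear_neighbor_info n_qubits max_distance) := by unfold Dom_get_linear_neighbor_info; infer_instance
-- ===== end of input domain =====

-- B replaces A's inner scan of all n qubits by the clipped window [q1-|d|, q1+|d|] built from two ranges (faster: O(n*d) vs O(n^2)).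

-- ===== PORT A =====
def get_linear_neighbor_info (n_qubits : Int) (max_distance : Int) : List (Int × List Int) :=
  (PySem.List.pyRange 0 n_qubits 1).map (fun q1 =>
    (q1, (PySem.List.pyRange 0 n_qubits 1).filter
          (fun q2 => decide (q1 ≠ q2 ∧ (q1 - q2) ^ 2 ≤ max_distance ^ 2))))

-- ===== PORT B =====
def get_linear_neighbor_info_alt (n_qubits : Int) (max_distance : Int) : List (Int × List Int) :=
  let ad := |max_distance|
  (PySem.List.pyRange 0 n_qubits 1).map (fun q1 =>
    (q1, PySem.List.pyRange (max 0 (q1 - ad)) q1 1 ++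
         PySem.List.pyRange (q1 + 1) (min n_qubits (q1 + ad + 1)) 1))

-- ===== PRECONDITION & SPEC =====
def Spec_get_linear_neighbor_info (n_qubits : Int) (max_distance : Int) (out : List (Int × List Int)) : Prop := out = get_linear_neighbor_info_alt n_qubits max_distance
instance (n_qubits : Int) (max_distance : Int) (out : List (Int × List Int)) : Decidable (Spec_get_linear_neighbor_info n_qubits max_distance out) := by unfold Spec_get_linear_neighbor_info; infer_instance

-- ===== CLAIM (what is proved, stated in full; the proofs are below) =====
def Claim_equal_get_linear_neighbor_info : Prop := ∀ (n_qubits : Int) (max_distance : Int), Dom_get_linear_neighbor_info n_qubits max_distance → Spec_get_linear_neighbor_info n_qubits max_distance (get_linear_neighbor_info n_qubits max_distance)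

-- ===== LEMMAS AND PROOFS =====

-- For one qubit q1 ∈ [0, n): A's filtered scan equals B's two clipped ranges.
lemma window_eq (n d q1 : Int) (h0 : 0 ≤ q1) (h1 : q1 < n) :
    (PySem.List.pyRange 0 n 1).filter
        (fun q2 => decide (q1 ≠ q2 ∧ (q1 - q2) ^ 2 ≤ d ^ 2))
    = PySem.List.pyRange (max 0 (q1 - |d|)) q1 1 ++
      PySem.List.pyRange (q1 + 1) (min n (q1 + |d| + 1)) 1 := by
  have ha : (0 : Int) ≤ |d| := abs_nonneg d
  have hsq : d ^ 2 = |d| ^ 2 := (sq_abs d).symm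
  set a := |d| with hadef
  set lo := max 0 (q1 - a) with hlo
  set hi := min n (q1 + a + 1) with hhi
  have h2 : (0:Int) ≤ lo := by omega
  have h3 : lo ≤ q1 := by omega
  have h4 : q1 + 1 ≤ hi := by omega
  have h5 : hi ≤ n := by omega
  rw [PySem.List.pyRange_one_append 0 lo n h2 (by omega),
      PySem.List.pyRange_one_append lo q1 n h3 (by omega),
      PySem.List.pyRange_one_append q1 (q1+1) n (by omega) (by omega),
      PySem.List.pyRange_one_append (q1+1) hi n h4 h5,
      PySem.List.pyRange_one_singleton]
  simp only [List.filter_append]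
  have habs : ∀ x : Int, ((q1 - x) ^ 2 ≤ d ^ 2) ↔ (-a ≤ q1 - x ∧ q1 - x ≤ a) := by
    intro x
    rw [hsq, sq_le_sq, abs_of_nonneg ha, abs_le]
  have e1 : (PySem.List.pyRange 0 lo 1).filter
      (fun q2 => decide (q1 ≠ q2 ∧ (q1 - q2) ^ 2 ≤ d ^ 2)) = [] := by
    rw [List.filter_eq_nil_iff]
    intro x hx
    rw [PySem.List.mem_pyRange_one] at hx
    simp only [decide_eq_true_eq, not_and, habs x]
    omega
  have e2 : (PySem.List.pyRange lo q1 1).filter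
      (fun q2 => decide (q1 ≠ q2 ∧ (q1 - q2) ^ 2 ≤ d ^ 2)) = PySem.List.pyRange lo q1 1 := by
    rw [List.filter_eq_self]
    intro x hx
    rw [PySem.List.mem_pyRange_one] at hx
    simp only [decide_eq_true_eq, habs x]
    omega
  have e3 : (PySem.List.pyRange (q1+1) hi 1).filter
      (fun q2 => decide (q1 ≠ q2 ∧ (q1 - q2) ^ 2 ≤ d ^ 2)) = PySem.List.pyRange (q1+1) hi 1 := by
    rw [List.filter_eq_self]
    intro x hx
    rw [PySem.List.mem_pyRange_one] at hx
    simp only [decide_eq_true_eq, habs x]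
    omega
  have e4 : (PySem.List.pyRange hi n 1).filter
      (fun q2 => decide (q1 ≠ q2 ∧ (q1 - q2) ^ 2 ≤ d ^ 2)) = [] := by
    rw [List.filter_eq_nil_iff]
    intro x hx
    rw [PySem.List.mem_pyRange_one] at hx
    simp only [decide_eq_true_eq, not_and, habs x]
    omega
  rw [e1, e2, e3, e4]
  simp

-- ===== VERDICT (by name: the statement is the Claim_ definition above) =====
theorem get_linear_neighbor_info_spec : Claim_equal_get_linear_neighbor_info := by
  intro n d _
  unfold Spec_get_linear_neighbor_info get_linear_neighbor_info get_linear_neighbor_info_alt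
  apply List.map_congr_left
  intro q1 hq1
  rw [PySem.List.mem_pyRange_one] at hq1
  exact congrArg (Prod.mk q1) (window_eq n d q1 hq1.1 hq1.2)
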